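-- pv_equiv track=rewrite | github.com/yhsiang/adventofcode | 2022/day17/test.py | get_surface_map
-- ===== SOURCE A (Python) =====
-- def get_surface_map(tower, towerheight):
--     surface = []
--     for x in range(0, 7):
--         y = towerheight
--         while (x, y) not in tower and y > 0:
--             y -= 1
--         surface.append(towerheight - y)
--     return tuple(surface)
-- ===== SOURCE B (Python) =====
-- def get_surface_map(tower, towerheight):
--     best = [0] * 7
--     for x, y in tower:
--         if 0 <= x < 7 and best[x] < y <= towerheight:
--             best[x] = y
--     return tuple(max(towerheight - b, 0) for b in best)
-- ===== Notes on version B (the rewrite author's own statement) =====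
-- stated objective: faster
-- what changed: Instead of scanning downward from towerheight in each of the 7 columns, B makes a single pass over the tower cells keeping the highest occupied y <= towerheight per column, then returns the clamped depths.
import Mathlib
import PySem

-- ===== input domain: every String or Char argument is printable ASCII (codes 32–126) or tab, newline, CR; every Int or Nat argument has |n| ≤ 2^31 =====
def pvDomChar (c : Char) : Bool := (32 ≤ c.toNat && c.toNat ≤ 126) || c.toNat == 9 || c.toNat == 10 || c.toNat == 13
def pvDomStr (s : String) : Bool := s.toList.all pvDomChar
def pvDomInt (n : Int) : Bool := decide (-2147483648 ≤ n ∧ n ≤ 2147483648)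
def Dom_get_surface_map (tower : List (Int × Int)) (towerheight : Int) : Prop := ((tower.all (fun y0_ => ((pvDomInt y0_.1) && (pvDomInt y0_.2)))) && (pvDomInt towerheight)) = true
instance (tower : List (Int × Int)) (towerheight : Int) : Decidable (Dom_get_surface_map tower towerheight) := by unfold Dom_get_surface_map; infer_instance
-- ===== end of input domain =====

-- B replaces A's per-column downward scan (O(7*towerheight)) with one pass over the tower
-- cells keeping the highest occupied y ≤ towerheight per column (O(|tower|)): faster.

-- ===== PORT A =====
-- the 'while (x, y) not in tower and y > 0: y -= 1' loop of A, step for step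
def pvDropA (tower : List (Int × Int)) (x : Int) (y : Int) : Int :=
  if (x, y) ∈ tower ∨ ¬ (y > 0) then y
  else pvDropA tower x (y - 1)
termination_by y.toNat
decreasing_by
  rename_i h
  push_neg at h
  omega

def get_surface_map (tower : List (Int × Int)) (towerheight : Int) : List Int :=
  (PySem.List.pyRange 0 7 1).foldl
    (fun surface x => surface ++ [towerheight - pvDropA tower x towerheight]) []

-- ===== PORT B =====
def get_surface_map_alt (tower : List (Int × Int)) (towerheight : Int) : List Int :=
  let best := tower.foldl
    (fun (best : List Int) (p : Int × Int) =>
      if 0 ≤ p.1 ∧ p.1 < 7 ∧ best.getD p.1.toNat 0 < p.2 ∧ p.2 ≤ towerheight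
      then best.set p.1.toNat p.2 else best)
    [0, 0, 0, 0, 0, 0, 0]
  best.map (fun b => max (towerheight - b) 0)

-- ===== PRECONDITION & SPEC =====
def Spec_get_surface_map (tower : List (Int × Int)) (towerheight : Int) (out : List Int) : Prop := out = get_surface_map_alt tower towerheight
instance (tower : List (Int × Int)) (towerheight : Int) (out : List Int) : Decidable (Spec_get_surface_map tower towerheight out) := by unfold Spec_get_surface_map; infer_instance

-- ===== CLAIM (what is proved, stated in full; the proofs are below) =====
def Claim_equal_get_surface_map : Prop := ∀ (tower : List (Int × Int)) (towerheight : Int), Dom_get_surface_map tower towerheight → Spec_get_surface_map tower towerheight (get_surface_map tower towerheight)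

-- ===== LEMMAS AND PROOFS =====

-- scalar fold describing B's best value for one column
def pvCol (tower : List (Int × Int)) (x th acc : Int) : Int :=
  tower.foldl (fun acc p => if p.1 = x ∧ acc < p.2 ∧ p.2 ≤ th then p.2 else acc) acc

lemma pvCol_mono (tower : List (Int × Int)) (x th acc : Int) : acc ≤ pvCol tower x th acc := by
  induction tower generalizing acc with
  | nil => simp [pvCol]
  | cons p t ih =>
    simp only [pvCol, List.foldl_cons] at *
    split_ifs with h
    · exact le_trans (le_of_lt h.2.1) (ih _)
    · exact ih acc

lemma pvCol_stop (tower : List (Int × Int)) (x th acc : Int) :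
    pvCol tower x th acc = acc ∨ ((x, pvCol tower x th acc) ∈ tower ∧ pvCol tower x th acc ≤ th) := by
  induction tower generalizing acc with
  | nil => simp [pvCol]
  | cons p t ih =>
    simp only [pvCol, List.foldl_cons] at *
    split_ifs with h
    · rcases ih p.2 with h1 | h1
      · right
        rw [h1]
        refine ⟨?_, h.2.2⟩
        have hpx : (x, p.2) = p := by rw [← h.1]
        rw [hpx]
        exact List.mem_cons_self
      · exact Or.inr ⟨List.mem_cons_of_mem _ h1.1, h1.2⟩
    · rcases ih acc with h1 | h1
      · exact Or.inl h1
      · exact Or.inr ⟨List.mem_cons_of_mem _ h1.1, h1.2⟩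

lemma pvCol_max (tower : List (Int × Int)) (x th acc : Int) :
    ∀ p ∈ tower, p.1 = x → p.2 ≤ th → p.2 ≤ pvCol tower x th acc := by
  induction tower generalizing acc with
  | nil => simp
  | cons q t ih =>
    intro p hp hx hle
    simp only [pvCol, List.foldl_cons] at *
    rcases List.mem_cons.mp hp with rfl | hp
    · by_cases hc : p.1 = x ∧ acc < p.2 ∧ p.2 ≤ th
      · rw [if_pos hc]
        exact pvCol_mono t x th p.2
      · rw [if_neg hc]
        have hpa : p.2 ≤ acc := by
          by_cases hlt : acc < p.2
          · exact absurd ⟨hx, hlt, hle⟩ hc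
          · omega
        exact le_trans hpa (pvCol_mono t x th acc)
    · by_cases hc : q.1 = x ∧ acc < q.2 ∧ q.2 ≤ th
      · rw [if_pos hc]
        exact ih _ p hp hx hle
      · rw [if_neg hc]
        exact ih _ p hp hx hle

lemma pvDropA_eq (tower : List (Int × Int)) (x : Int) :
    ∀ (n : Nat) (y m : Int), y.toNat ≤ n → 0 ≤ m → m ≤ y →
    ((x, m) ∈ tower ∨ m ≤ 0) →
    (∀ y', m < y' → y' ≤ y → (x, y') ∉ tower) →
    pvDropA tower x y = m := by
  intro n
  induction n with
  | zero =>
    intro y m hn h0 hmy hstop _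
    have hym : y = m := by omega
    rw [pvDropA, if_pos (Or.inr (by omega))]
    exact hym
  | succ n ih =>
    intro y m hn h0 hmy hstop hno
    by_cases hym : y = m
    · subst hym
      rcases hstop with h | h
      · rw [pvDropA, if_pos (Or.inl h)]
      · rw [pvDropA, if_pos (Or.inr (by omega))]
    · have hlt : m < y := by omega
      have hmem : (x, y) ∉ tower := hno y hlt le_rfl
      rw [pvDropA, if_neg (by
        simp only [not_or, not_not]
        exact ⟨hmem, by omega⟩)]
      exact ih (y - 1) m (by omega) h0 (by omega) hstop
        (fun y' h1 h2 => hno y' h1 (by omega))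

-- A's per-column value equals B's clamped depth from the scalar fold
lemma pvCol_drop (tower : List (Int × Int)) (x th : Int) :
    th - pvDropA tower x th = max (th - pvCol tower x th 0) 0 := by
  set m := pvCol tower x th 0 with hm
  have h0 : 0 ≤ m := pvCol_mono tower x th 0
  by_cases hth : th ≤ 0
  · have hdrop : pvDropA tower x th = th := by
      rw [pvDropA, if_pos (Or.inr (by omega))]
    rw [hdrop]
    omega
  · push_neg at hth
    have hmth : m ≤ th := by
      rcases pvCol_stop tower x th 0 with h | h
      · omega
      · exact h.2
    have hstop : (x, m) ∈ tower ∨ m ≤ 0 := by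
      rcases pvCol_stop tower x th 0 with h | h
      · exact Or.inr (by omega)
      · exact Or.inl h.1
    have hdrop : pvDropA tower x th = m := by
      apply pvDropA_eq tower x th.toNat th m le_rfl h0 hmth hstop
      intro y' h1 h2 hmem
      have := pvCol_max tower x th 0 (x, y') hmem rfl h2
      omega
    rw [hdrop]
    omega

lemma pvBest_len (tower : List (Int × Int)) (th : Int) :
    ∀ best : List Int,
    (tower.foldl
      (fun (best : List Int) (p : Int × Int) =>
        if 0 ≤ p.1 ∧ p.1 < 7 ∧ best.getD p.1.toNat 0 < p.2 ∧ p.2 ≤ th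
        then best.set p.1.toNat p.2 else best) best).length = best.length := by
  induction tower with
  | nil => intro best; rfl
  | cons p t ih =>
    intro best
    simp only [List.foldl_cons]
    split_ifs with h
    · rw [ih]
      simp
    · exact ih best

lemma pvBest_getD (tower : List (Int × Int)) (th : Int) (i : Nat) (hi : i < 7) :
    ∀ (best : List Int), best.length = 7 →
    (tower.foldl
      (fun (best : List Int) (p : Int × Int) =>
        if 0 ≤ p.1 ∧ p.1 < 7 ∧ best.getD p.1.toNat 0 < p.2 ∧ p.2 ≤ th
        then best.set p.1.toNat p.2 else best) best).getD i 0
      = pvCol tower (i : Int) th (best.getD i 0) := by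
  induction tower with
  | nil =>
    intro best hlen
    simp [pvCol]
  | cons p t ih =>
    intro best hlen
    simp only [pvCol, List.foldl_cons] at *
    have hlen' :
        (if 0 ≤ p.1 ∧ p.1 < 7 ∧ best.getD p.1.toNat 0 < p.2 ∧ p.2 ≤ th
         then best.set p.1.toNat p.2 else best).length = 7 := by
      split_ifs <;> simp [hlen]
    rw [ih _ hlen']
    congr 1
    by_cases hx : p.1 = (i : Int)
    · have htn : p.1.toNat = i := by omega
      by_cases hc : best.getD i 0 < p.2 ∧ p.2 ≤ th
      · rw [if_pos ⟨by omega, by omega, by rw [htn]; exact hc.1, hc.2⟩, if_pos ⟨hx, hc⟩, htn]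
        have hilt : i < best.length := by omega
        simp [List.getD, List.getElem?_set_self hilt]
      · rw [if_neg (fun hcon => hc ⟨by rw [← htn]; exact hcon.2.2.1, hcon.2.2.2⟩),
          if_neg (fun hcon => hc hcon.2)]
    · by_cases hc : 0 ≤ p.1 ∧ p.1 < 7 ∧ best.getD p.1.toNat 0 < p.2 ∧ p.2 ≤ th
      · rw [if_pos hc, if_neg (fun hcon => hx hcon.1)]
        have hne : p.1.toNat ≠ i := by omega
        simp [List.getD, List.getElem?_set_ne hne]
      · rw [if_neg hc, if_neg (fun hcon => hx hcon.1)]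

lemma pvList7 (l : List Int) (h : l.length = 7) :
    l = [l.getD 0 0, l.getD 1 0, l.getD 2 0, l.getD 3 0, l.getD 4 0, l.getD 5 0, l.getD 6 0] := by
  match l, h with
  | [a, b, c, d, e, f, g], _ => rfl

-- ===== VERDICT (by name: the statement is the Claim_ definition above) =====
theorem get_surface_map_spec : Claim_equal_get_surface_map := by
  intro tower th _
  unfold Spec_get_surface_map get_surface_map get_surface_map_alt
  have hrange : PySem.List.pyRange 0 7 1 = [0, 1, 2, 3, 4, 5, 6] := by decide
  rw [hrange]
  set best := tower.foldl
    (fun (best : List Int) (p : Int × Int) =>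
      if 0 ≤ p.1 ∧ p.1 < 7 ∧ best.getD p.1.toNat 0 < p.2 ∧ p.2 ≤ th
      then best.set p.1.toNat p.2 else best) [0, 0, 0, 0, 0, 0, 0] with hbest
  have hlen : best.length = 7 := by rw [hbest, pvBest_len]; rfl
  have hget : ∀ i : Nat, i < 7 → best.getD i 0 = pvCol tower (i : Int) th 0 := by
    intro i hi
    rw [hbest, pvBest_getD tower th i hi _ rfl]
    congr 1
    interval_cases i <;> rfl
  rw [pvList7 best hlen]
  simp only [List.foldl_cons, List.foldl_nil, List.map, List.nil_append, List.cons_append,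
    List.append_nil]
  rw [hget 0 (by omega), hget 1 (by omega), hget 2 (by omega), hget 3 (by omega),
    hget 4 (by omega), hget 5 (by omega), hget 6 (by omega)]
  simp only [pvCol_drop]
  norm_num
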